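-- pv_equiv track=rewrite | github.com/sarishtshreshth0/plag_extract | Project_CodeNet_Python800/p02866/s611401078.py | solve
-- ===== SOURCE A (Python) =====
-- from collections import Counter
--
-- def solve(n, arr):
--     if arr[0] != 0:
--         return 0
--
--     c = Counter(arr)
--
--     if c[0] != 1:
--         return 0
--
--     for i in range(max(c) + 1):
--         if i not in c:
--             return 0
--
--     c = list(c.items())
--     c.sort()
--
--     prev = 1
--     ans = 1
--     mod = 998244353
--
--     for _, i in c[1:]:
--         ans *= prev**i % mod
--         ans %= mod
--         prev = i
--
--     return ans
-- ===== SOURCE B (Python) =====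
-- def solve(n, arr):
--     # Per-element product: each element x beyond the two smallest distinct values
--     # contributes cnt[pred[x]] (count of the next-smaller distinct value) to the answer.
--     if arr[0] != 0:
--         return 0
--     cnt = {}
--     for x in arr:
--         cnt[x] = cnt.get(x, 0) + 1
--     if cnt[0] != 1:
--         return 0
--     if not all(d in cnt for d in range(max(arr) + 1)):
--         return 0
--     vals = sorted(cnt)
--     if len(vals) < 2:
--         return 1
--     pred = dict(zip(vals[1:], vals))
--     second = vals[1]
--     mod = 998244353
--     ans = 1
--     for x in arr:
--         if x > second:
--             ans = ans * cnt[pred[x]] % mod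
--     return ans
-- ===== Notes on version B (the rewrite author's own statement) =====
-- stated objective: alternative
-- what changed: Replaces A's sorted-run fold with threaded prev and pow (prev**count per distinct value) by a per-element product: a predecessor map over the sorted distinct values is built once and then a single pass over arr multiplies in cnt[pred[x]] for every element beyond the two smallest distinct values, with no exponentiation and no sorting of the (key,count) items.
-- outside the precondition, e.g. on solve(1, []): A raises IndexError, B raises IndexError
import Mathlib
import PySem

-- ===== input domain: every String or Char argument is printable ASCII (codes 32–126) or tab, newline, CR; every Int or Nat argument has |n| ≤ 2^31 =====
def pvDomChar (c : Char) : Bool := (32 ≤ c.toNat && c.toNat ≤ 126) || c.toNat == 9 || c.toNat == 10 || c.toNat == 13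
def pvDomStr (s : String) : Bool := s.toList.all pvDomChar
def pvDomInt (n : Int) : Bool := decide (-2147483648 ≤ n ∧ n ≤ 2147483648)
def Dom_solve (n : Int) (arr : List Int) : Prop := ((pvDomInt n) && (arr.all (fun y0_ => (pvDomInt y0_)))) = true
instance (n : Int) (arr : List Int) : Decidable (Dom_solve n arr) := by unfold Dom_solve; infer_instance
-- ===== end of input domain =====

-- B replaces A's sorted-run fold with threaded prev and pow by a per-element product
-- over arr using a predecessor map (objective: alternative decomposition, same cost).

-- shared helper: the early-exit scan over range(max+1) present in both Pythons
-- (A: a for loop with 'return 0'; B: all(...) over the same range, same short-circuit)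


def pvAllUpTo (p : Int → Bool) (i mx : Int) : Bool :=
  if h : i ≤ mx then (if p i then pvAllUpTo p (i + 1) mx else false) else true
termination_by (mx + 1 - i).toNat
decreasing_by omega

-- ===== PORT A =====
def solve (n : Int) (arr : List Int) : Int :=
  match PySem.List.pyGet? arr 0 with
  | none => 0   -- IndexError on empty arr; excluded by Pre_solve
  | some a0 =>
    if a0 ≠ 0 then 0
    else
      let c := PySem.Dict.counter arr
      if c.getD 0 0 ≠ 1 then 0
      else
        match PySem.List.max? c.keys (fun x => x) with
        | none => 0   -- unreachable: arr is nonempty, so the counter has keys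
        | some mx =>
          if pvAllUpTo (fun i => c.contains i) 0 mx then
            let cs := PySem.List.sorted2 c.items (fun p => p.1) (fun p => p.2) false
            ((cs.drop 1).foldl
              (fun (st : Int × Int) (p : Int × Int) =>
                (p.2, PySem.Int.mod (st.2 * PySem.Int.mod (st.1 ^ p.2.toNat) 998244353) 998244353))
              (1, 1)).2
          else 0

-- ===== PORT B =====
def solve_alt (n : Int) (arr : List Int) : Int :=
  match PySem.List.pyGet? arr 0 with
  | none => 0   -- IndexError on empty arr
  | some a0 =>
    if a0 ≠ 0 then 0
    else
      let cnt := arr.foldl (fun d x => d.insert x (d.getD x 0 + 1)) PySem.Dict.empty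
      if cnt.getD 0 0 ≠ 1 then 0
      else
        match PySem.List.max? arr (fun x => x) with
        | none => 0   -- unreachable: arr is nonempty
        | some mx =>
          if !(pvAllUpTo (fun d => cnt.contains d) 0 mx) then 0
          else
            let vals := PySem.List.sorted cnt.keys (fun x => x) false
            if vals.length < 2 then 1
            else
              let pred := PySem.Dict.ofList ((vals.drop 1).zip vals)
              match PySem.List.pyGet? vals 1 with
              | none => 1   -- unreachable: vals has at least 2 elements
              | some second =>
                arr.foldl (fun ans x =>
                  if second < x then
                    PySem.Int.mod (ans * cnt.getD (pred.getD x 0) 0) 998244353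
                  else ans) 1

-- ===== PRECONDITION & SPEC =====
-- Pre_solve excludes only the empty list, on which A raises IndexError at arr[0] (B raises there too).
def Pre_solve (n : Int) (arr : List Int) : Prop := arr ≠ []
instance (n : Int) (arr : List Int) : Decidable (Pre_solve n arr) := by unfold Pre_solve; infer_instance
def pvWitness_solve : Int × List Int := (5, [0, 1, 1, 2])
def Spec_solve (n : Int) (arr : List Int) (out : Int) : Prop := out = solve_alt n arr
instance (n : Int) (arr : List Int) (out : Int) : Decidable (Spec_solve n arr out) := by unfold Spec_solve; infer_instance

-- ===== CLAIM (what is proved, stated in full; the proofs are below) =====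
def Claim_equal_solve : Prop := ∀ (n : Int) (arr : List Int), Dom_solve n arr → Pre_solve n arr → Spec_solve n arr (solve n arr)

-- ===== LEMMAS AND PROOFS =====
def pvChain : Int → List (Int × Int) → Int
  | _, [] => 1
  | p, (_, c) :: rs => p ^ c.toNat * pvChain c rs

theorem pv_mulmod_left (x y M : Int) : (x % M * y) % M = (x * y) % M := by
  conv_lhs => rw [Int.mul_emod, Int.emod_emod_of_dvd _ dvd_rfl, ← Int.mul_emod]

theorem pvA_fold (rs : List (Int × Int)) : ∀ (p a : Int), a % 998244353 = a →
    ((rs.foldl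
        (fun (st : Int × Int) (q : Int × Int) =>
          (q.2, PySem.Int.mod (st.2 * PySem.Int.mod (st.1 ^ q.2.toNat) 998244353) 998244353))
        (p, a)).2) = (a * pvChain p rs) % 998244353 := by
  induction rs with
  | nil => intro p a h; simpa [pvChain] using h.symm
  | cons q rs' ih =>
    intro p a h
    obtain ⟨k, c⟩ := q
    simp only [List.foldl_cons, pvChain]
    rw [PySem.Int.mod_eq_emod_of_pos (b := 998244353) (by norm_num), PySem.Int.mod_eq_emod_of_pos (b := 998244353) (by norm_num)]
    rw [ih c _ (Int.emod_emod_of_dvd _ dvd_rfl)]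
    rw [pv_mulmod_left]
    rw [show a * (p ^ c.toNat % 998244353) * pvChain c rs' = p ^ c.toNat % 998244353 * (a * pvChain c rs') by ring,
        pv_mulmod_left,
        show p ^ c.toNat * (a * pvChain c rs') = a * (p ^ c.toNat * pvChain c rs') by ring]

theorem pvB_fold (second : Int) (w : Int → Int) (l : List Int) : ∀ (a : Int), a % 998244353 = a →
    l.foldl (fun ans x => if second < x then PySem.Int.mod (ans * w x) 998244353 else ans) a
      = (a * (l.map (fun x => if second < x then w x else 1)).prod) % 998244353 := by
  induction l with
  | nil => intro a h; simpa using h.symm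
  | cons x l' ih =>
    intro a h
    simp only [List.foldl_cons, List.map_cons, List.prod_cons]
    by_cases hx : second < x
    · simp only [if_pos hx]
      rw [PySem.Int.mod_eq_emod_of_pos (b := 998244353) (by norm_num)]
      rw [ih _ (Int.emod_emod_of_dvd _ dvd_rfl), pv_mulmod_left, mul_assoc]
    · simp only [if_neg hx, one_mul]
      exact ih a h

theorem pv_prod_count (arr ks : List Int) (f : Int → Int) (hnd : ks.Nodup)
    (hmem : ∀ x, x ∈ ks ↔ x ∈ arr) :
    (arr.map f).prod = (ks.map (fun k => f k ^ arr.count k)).prod := by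
  rw [Finset.prod_list_map_count]
  have hfs : arr.toFinset = ks.toFinset := by
    ext x; simp [hmem]
  rw [hfs, ← List.prod_toFinset _ hnd]

theorem pv_chain_eq (arr : List Int) (w : Int → Int) : ∀ (rest : List Int) (prevk : Int),
    (∀ pr ∈ rest.zip (prevk :: rest), w pr.1 = (arr.count pr.2 : Int)) →
    (rest.map (fun k => w k ^ arr.count k)).prod
      = pvChain ((arr.count prevk : Int)) (rest.map (fun k => (k, (arr.count k : Int)))) := by
  intro rest
  induction rest with
  | nil => intro _ _; simp [pvChain]
  | cons c rest' ih =>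
    intro prevk H
    simp only [List.map_cons, List.prod_cons, pvChain]
    have hc : w c = (arr.count prevk : Int) := H (c, prevk) (by simp [List.zip_cons_cons])
    rw [hc, Int.toNat_natCast]
    congr 1
    exact ih c (fun pr hpr => H pr (by simp [List.zip_cons_cons]; right; exact hpr))

theorem pv_getD_foldl_absent (pairs : List (Int × Int)) : ∀ (d : PySem.Dict Int Int) (k : Int),
    k ∉ pairs.map Prod.fst →
    (pairs.foldl (fun d p => d.insert p.1 p.2) d).getD k 0 = d.getD k 0 := by
  induction pairs with
  | nil => intro d k _; rfl
  | cons q rest ih =>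
    intro d k hk
    simp only [List.map_cons, List.mem_cons, not_or] at hk
    simp only [List.foldl_cons]
    rw [ih _ k hk.2, PySem.Dict.getD_insert_of_ne _ _ _ hk.1]

theorem pv_getD_foldl (pairs : List (Int × Int)) : ∀ (d : PySem.Dict Int Int) (k v : Int),
    (pairs.map Prod.fst).Nodup → (k, v) ∈ pairs →
    (pairs.foldl (fun d p => d.insert p.1 p.2) d).getD k 0 = v := by
  induction pairs with
  | nil => intro d k v _ hmem; simp at hmem
  | cons q rest ih =>
    intro d k v hnd hmem
    simp only [List.map_cons, List.nodup_cons] at hnd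
    simp only [List.foldl_cons]
    rcases List.mem_cons.mp hmem with heq | hrest
    · subst heq
      rw [pv_getD_foldl_absent rest _ k hnd.1, PySem.Dict.getD_insert_self]
    · exact ih _ k v hnd.2 hrest

theorem pv_getD_ofList (pairs : List (Int × Int)) (hnd : (pairs.map Prod.fst).Nodup)
    (k v : Int) (hmem : (k, v) ∈ pairs) :
    (PySem.Dict.ofList pairs).getD k 0 = v := by
  show (pairs.foldl (fun d p => d.insert p.1 p.2) PySem.Dict.empty).getD k 0 = v
  exact pv_getD_foldl pairs _ k v hnd hmem

theorem insertBy2_congr (x : Int × Int) : ∀ (acc : List (Int × Int)), (∀ y ∈ acc, x.1 ≠ y.1) →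
    PySem.List.insertBy (fun a b => decide (a.1 < b.1) || (!decide (b.1 < a.1) && decide (a.2 < b.2))) x acc
      = PySem.List.insertBy (fun a b => decide (a.1 < b.1)) x acc := by
  intro acc
  induction acc with
  | nil => intro _; rfl
  | cons y ys ih =>
    intro h
    have hxy : x.1 ≠ y.1 := h y (by simp)
    have hb : (decide (x.1 < y.1) || (!decide (y.1 < x.1) && decide (x.2 < y.2))) = decide (x.1 < y.1) := by
      by_cases hlt : x.1 < y.1
      · simp [hlt, show ¬ y.1 < x.1 by omega]
      · simp [hlt, show y.1 < x.1 by omega]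
    simp only [PySem.List.insertBy, hb]
    by_cases hlt : x.1 < y.1
    · simp [hlt]
    · simp only [hlt, decide_false, if_false, Bool.false_eq_true]
      rw [ih (fun y hy => h y (by simp [hy]))]

theorem foldl_insertBy2_congr : ∀ (xs acc : List (Int × Int)),
    (∀ x ∈ xs, ∀ y ∈ acc, x.1 ≠ y.1) → xs.Pairwise (fun a b => a.1 ≠ b.1) →
    xs.foldl (fun acc x => PySem.List.insertBy
        (fun a b => decide (a.1 < b.1) || (!decide (b.1 < a.1) && decide (a.2 < b.2))) x acc) acc
      = xs.foldl (fun acc x => PySem.List.insertBy (fun a b => decide (a.1 < b.1)) x acc) acc := by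
  intro xs
  induction xs with
  | nil => intro acc _ _; rfl
  | cons x xs' ih =>
    intro acc hacc hp
    simp only [List.foldl_cons]
    rw [insertBy2_congr x acc (hacc x (by simp))]
    apply ih
    · intro z hz y hy
      rw [PySem.List.mem_insertBy] at hy
      rcases hy with rfl | hy
      · exact ((List.pairwise_cons.mp hp).1 z hz).symm
      · exact hacc z (by simp [hz]) y hy
    · exact List.Pairwise.of_cons hp

theorem sorted2_fst (xs : List (Int × Int)) (h : xs.Pairwise (fun a b => a.1 ≠ b.1)) :
    PySem.List.sorted2 xs (fun p => p.1) (fun p => p.2) false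
      = PySem.List.sorted xs (fun p => p.1) false := by
  rw [PySem.List.sorted_eq_foldl_insertBy]
  show xs.foldl (fun acc x => PySem.List.insertBy
      (fun a b => decide (a.1 < b.1) || (!decide (b.1 < a.1) && decide (a.2 < b.2))) x acc) []
    = _
  exact foldl_insertBy2_congr xs [] (by simp) h

theorem sorted_items (arr : List Int) :
    PySem.List.sorted2 (PySem.Dict.counter arr).items (fun p => p.1) (fun p => p.2) false
      = (PySem.List.sorted (PySem.Set.ofList arr) (fun x => x) false).map
          (fun k => (k, (arr.count k : Int))) := by
  rw [PySem.Dict.items_counter]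
  rw [sorted2_fst _ (by
    refine List.Pairwise.map _ ?_ (PySem.Set.nodup_ofList arr)
    intro a b hab
    simpa using hab)]
  apply PySem.List.sorted_eq_of_perm_of_pairwise_lt
  · exact (PySem.List.sorted_perm _ _ _).map _
  · refine List.Pairwise.map _ ?_ (PySem.List.sorted_ofList_pairwise_lt arr)
    intro a b hab
    simpa using hab

theorem pv_max_eq (arr : List Int) (hne : arr ≠ []) :
    PySem.List.max? (PySem.Set.ofList arr) (fun x => x) = PySem.List.max? arr (fun x => x) := by
  obtain ⟨M, hM⟩ : ∃ M, PySem.List.max? arr (fun x => x) = some M := by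
    cases h : PySem.List.max? arr (fun x => x) with
    | none => exact absurd ((PySem.List.max?_eq_none_iff _ _).mp h) hne
    | some M => exact ⟨M, rfl⟩
  obtain ⟨K, hK⟩ : ∃ K, PySem.List.max? (PySem.Set.ofList arr) (fun x => x) = some K := by
    cases h : PySem.List.max? (PySem.Set.ofList arr) (fun x => x) with
    | none =>
      have h2 := (PySem.List.max?_eq_none_iff _ _).mp h
      cases arr with
      | nil => exact absurd rfl hne
      | cons a l =>
        exfalso
        have : a ∈ PySem.Set.ofList (a :: l) := by rw [PySem.Set.mem_ofList]; simp
        rw [h2] at this; simp at this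
    | some K => exact ⟨K, rfl⟩
  rw [hM, hK]
  have hKm : K ∈ arr := by
    have := PySem.List.max?_mem hK; rwa [PySem.Set.mem_ofList] at this
  have hMm : M ∈ PySem.Set.ofList arr := by
    rw [PySem.Set.mem_ofList]; exact PySem.List.max?_mem hM
  have h1 : K ≤ M := PySem.List.max?_isMax hM K hKm
  have h2 : M ≤ K := PySem.List.max?_isMax hK M hMm
  have : K = M := le_antisymm h1 h2
  rw [this]

theorem pv_pyGet1 (a b : Int) (t : List Int) : PySem.List.pyGet? (a :: b :: t) 1 = some b := by
  simp [PySem.List.pyGet?, PySem.List.pyIdx?]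



theorem solve_eq (n : Int) (arr : List Int) (hpre : arr ≠ []) :
    solve n arr = solve_alt n arr := by
  obtain ⟨a, l, rfl⟩ : ∃ a is, arr = a :: is := by
    cases arr with
    | nil => exact absurd rfl hpre
    | cons a is => exact ⟨a, is, rfl⟩
  set arr := a :: l with harr
  have hget0 : PySem.List.pyGet? arr 0 = some a := by
    simp [harr, PySem.List.pyGet?, PySem.List.pyIdx?]
  have hcnt := PySem.Dict.foldl_insert_getD_add_one_eq_counter (κ := Int) arr
  by_cases ha : a = 0
  swap
  · simp only [solve, solve_alt, hget0, hcnt, if_pos ha]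
  subst ha
  simp only [solve, solve_alt, hget0, hcnt, if_neg (show ¬((0:Int) ≠ 0) by decide)]
  by_cases h1 : (PySem.Dict.counter arr).getD 0 0 ≠ 1
  · simp only [if_pos h1]
  simp only [if_neg h1, PySem.Dict.keys_counter, pv_max_eq arr hpre]
  cases hmx : PySem.List.max? arr (fun x => x) with
  | none => rfl
  | some mx =>
  simp only []
  by_cases hG : pvAllUpTo (fun i => (PySem.Dict.counter arr).contains i) 0 mx
  swap
  · rw [if_neg hG, if_pos (by simp at hG ⊢; exact hG)]
  rw [if_pos hG, if_neg (by simp [hG])]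
  rw [sorted_items arr]
  have hknd : (PySem.List.sorted (PySem.Set.ofList arr) (fun x => x) false).Nodup :=
    ((PySem.List.sorted_perm _ _ _).nodup_iff).mpr (PySem.Set.nodup_ofList arr)
  have hkmem : ∀ x, x ∈ PySem.List.sorted (PySem.Set.ofList arr) (fun x => x) false ↔ x ∈ arr := by
    intro x; rw [PySem.List.mem_sorted, PySem.Set.mem_ofList]
  have hklt : (PySem.List.sorted (PySem.Set.ofList arr) (fun x => x) false).Pairwise (· < ·) :=
    PySem.List.sorted_ofList_pairwise_lt arr
  rw [pvA_fold _ 1 1 (by norm_num), one_mul]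
  by_cases hlen : (PySem.List.sorted (PySem.Set.ofList arr) (fun x => x) false).length < 2
  · rw [if_pos hlen]
    have hdrop : (((PySem.List.sorted (PySem.Set.ofList arr) (fun x => x) false).map
        (fun k => (k, (arr.count k : Int)))).drop 1) = [] := by
      rw [List.drop_eq_nil_iff]
      simpa using hlen
    rw [hdrop]
    norm_num [pvChain]
  rw [if_neg hlen]
  obtain ⟨k0, k1, rest, hksE⟩ : ∃ k0 k1 rest,
      PySem.List.sorted (PySem.Set.ofList arr) (fun x => x) false = k0 :: k1 :: rest := by
    rcases hE : PySem.List.sorted (PySem.Set.ofList arr) (fun x => x) false with _ | ⟨x, _ | ⟨y, t⟩⟩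
    · rw [hE] at hlen; simp at hlen
    · rw [hE] at hlen; simp at hlen
    · exact ⟨x, y, t, rfl⟩
  rw [hksE] at hknd hkmem hklt ⊢
  rw [pv_pyGet1]
  refine Eq.trans ?_ (pvB_fold k1
    (fun x => (PySem.Dict.counter arr).getD
      ((PySem.Dict.ofList ((List.drop 1 (k0 :: k1 :: rest)).zip (k0 :: k1 :: rest))).getD x 0) 0)
    arr 1 (by norm_num)).symm
  rw [one_mul]
  have hnd2 : (k1 :: rest).Nodup := hknd.of_cons
  have hndfst : (((k1 :: rest).zip (k0 :: k1 :: rest)).map Prod.fst).Nodup := by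
    rw [List.map_fst_zip (by simp)]
    exact hnd2
  have H : ∀ pr ∈ rest.zip (k1 :: rest),
      (PySem.Dict.counter arr).getD
        ((PySem.Dict.ofList ((k1 :: rest).zip (k0 :: k1 :: rest))).getD pr.1 0) 0
        = (arr.count pr.2 : Int) := by
    intro pr hpr
    have hpd : (PySem.Dict.ofList ((k1 :: rest).zip (k0 :: k1 :: rest))).getD pr.1 0 = pr.2 := by
      apply pv_getD_ofList _ (by simpa using hndfst)
      show (pr.1, pr.2) ∈ (k1 :: rest).zip (k0 :: k1 :: rest)
      rw [List.zip_cons_cons]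
      exact List.mem_cons_of_mem _ hpr
    rw [hpd, PySem.Dict.getD_counter]
  rw [pv_prod_count arr (k0 :: k1 :: rest) _ hknd hkmem]
  simp only [List.map_cons, List.prod_cons, List.drop_succ_cons, List.drop_zero, pvChain]
  rw [if_neg (show ¬ k1 < k0 from by
        have := (List.pairwise_cons.mp hklt).1 k1 (by simp); omega),
      if_neg (lt_irrefl k1)]
  simp only [one_pow, one_mul]
  congr 1
  conv_rhs => rw [List.map_congr_left (fun k hk => by
        rw [if_pos (show k1 < k from (List.pairwise_cons.mp (List.pairwise_cons.mp hklt).2).1 k hk)])]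
  exact (pv_chain_eq arr _ rest k1 H).symm

-- ===== VERDICT (by name: the statement is the Claim_ definition above) =====
theorem solve_spec : Claim_equal_solve := by
  intro n arr _ hpre
  unfold Spec_solve
  exact solve_eq n arr hpre
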